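-- pv_equiv track=rewrite | github.com/Pravin-techie/Same-Game | interface[DP].py | get_all_components
-- ===== SOURCE A (Python) =====
-- class GraphADT:
--     @staticmethod
--     def neighbors(r, c):
--         return [(r+1, c), (r-1, c), (r, c+1), (r, c-1)]
--
-- def dfs(board, r, c, color, visited, component):
--     rows = len(board)
--     cols = len(board[0])
--     if r < 0 or r >= rows or c < 0 or c >= cols:
--         return
--     if (r, c) in visited:
--         return
--     if board[r][c] != color:
--         return
--
--     visited.add((r, c))
--     component.append((r, c))
--
--     for nr, nc in GraphADT.neighbors(r, c):
--         dfs(board, nr, nc, color, visited, component)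
--
-- def get_component(board, r, c):
--     if board[r][c] is None:
--         return []
--     visited = set()
--     component = []
--     dfs(board, r, c, board[r][c], visited, component)
--     return component
--
-- def get_all_components(board):
--     """Get all valid components (size > 1) from the board"""
--     rows = len(board)
--     cols = len(board[0])
--     components = []
--     visited = set()
--
--     for r in range(rows):
--         for c in range(cols):
--             if board[r][c] and (r, c) not in visited:
--                 comp = get_component(board, r, c)
--                 for cell in comp:
--                     visited.add(cell)
--                 if len(comp) > 1:
--                     components.append(comp)
--
--     return components
-- ===== SOURCE B (Python) =====
-- def get_all_components(board):
--     """Get all valid components (size > 1) from the board"""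
--     rows = len(board)
--     cols = len(board[0])
--     components = []
--     visited = set()
--
--     for r in range(rows):
--         for c in range(cols):
--             if board[r][c] and (r, c) not in visited:
--                 color = board[r][c]
--                 seen = set()
--                 comp = []
--                 stack = [(r, c)]
--                 while stack:
--                     cr, cc = stack.pop()
--                     if cr < 0 or cr >= rows or cc < 0 or cc >= cols:
--                         continue
--                     if (cr, cc) in seen:
--                         continue
--                     if board[cr][cc] != color:
--                         continue
--                     seen.add((cr, cc))
--                     comp.append((cr, cc))
--                     for n in [(cr, cc - 1), (cr, cc + 1), (cr - 1, cc), (cr + 1, cc)]: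
--                         stack.append(n)
--                 for cell in comp:
--                     visited.add(cell)
--                 if len(comp) > 1:
--                     components.append(comp)
--
--     return components
-- ===== Notes on version B (the rewrite author's own statement) =====
-- stated objective: idiomatic
-- what changed: The recursive flood fill (helper dfs recursing on the four neighbours) is replaced by an iterative explicit-stack loop that pops a cell, validates it, and pushes its neighbours in reversed order, removing both recursion and the per-cell helper call chain; the outer scan and the size>1 filter are unchanged.
import Mathlib
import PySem

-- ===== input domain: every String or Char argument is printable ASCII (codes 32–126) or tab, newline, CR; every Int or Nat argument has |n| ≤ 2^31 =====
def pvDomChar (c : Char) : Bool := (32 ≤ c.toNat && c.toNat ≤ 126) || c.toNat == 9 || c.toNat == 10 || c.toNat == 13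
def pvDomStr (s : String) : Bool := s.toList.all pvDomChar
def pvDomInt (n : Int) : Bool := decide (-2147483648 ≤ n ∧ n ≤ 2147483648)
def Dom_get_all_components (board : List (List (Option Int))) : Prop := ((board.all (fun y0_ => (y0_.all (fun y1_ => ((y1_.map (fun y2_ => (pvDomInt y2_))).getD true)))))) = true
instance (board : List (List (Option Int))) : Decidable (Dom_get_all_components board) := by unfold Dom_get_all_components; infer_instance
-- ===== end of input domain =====

-- B replaces the recursive flood fill by an iterative explicit-stack loop (neighbours pushed
-- in reversed order so they are popped in the original order); outer scan and size>1 filter unchanged.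

-- ===== PORT A =====

-- board[r][c] for r, c passing the bounds checks of the Python (a missing cell of a ragged
-- board — excluded by Pre_ — reads as None, which both ports use identically)
def pvCell (board : List (List (Option Int))) (r c : Int) : Option Int :=
  match PySem.List.pyGet? board r with
  | some row => (PySem.List.pyGet? row c).getD none
  | none => none

-- Python truthiness of a cell value: None and 0 are falsy
def pvTruthy (o : Option Int) : Bool :=
  match o with
  | some v => v != 0
  | none => false

-- all in-bounds cells; used only in the termination measure of the two flood fills
def pvGrid (board : List (List (Option Int))) : List (Int × Int) :=
  (PySem.List.pyRange 0 (board.length : Int) 1).flatMap (fun r =>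
    (PySem.List.pyRange 0 ((board.headD []).length : Int) 1).map (fun c => (r, c)))

-- termination measure: number of in-bounds cells not yet visited
def pvUnseen (board : List (List (Option Int))) (v : List (Int × Int)) : Nat :=
  ((pvGrid board).filter (fun p => decide (p ∉ v))).length

-- the three lemmas below are cited by the termination proofs of the ports
theorem pvMem_set_add {α : Type} [BEq α] {s : List α} {x y : α} (h : y ∈ s) :
    y ∈ PySem.Set.add s x := by
  unfold PySem.Set.add
  split <;> simp [h]

theorem pvUnseen_mono (board : List (List (Option Int))) {v1 v2 : List (Int × Int)}
    (h : ∀ x ∈ v1, x ∈ v2) : pvUnseen board v2 ≤ pvUnseen board v1 := by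
  unfold pvUnseen
  simp only [← List.countP_eq_length_filter]
  exact List.countP_mono_left (fun a _ => by
    simp only [decide_eq_true_eq]; exact fun hv2 hv1 => hv2 (h a hv1))

theorem pvMem_grid {board : List (List (Option Int))} {r c : Int}
    (h : ¬(r < 0 ∨ (board.length : Int) ≤ r ∨ c < 0 ∨ ((board.headD []).length : Int) ≤ c)) :
    (r, c) ∈ pvGrid board := by
  rw [not_or, not_or, not_or] at h
  obtain ⟨h1, h2, h3, h4⟩ := h
  unfold pvGrid
  refine List.mem_flatMap.mpr
    ⟨r, PySem.List.mem_pyRange_one.mpr ⟨by omega, by omega⟩, ?_⟩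
  exact List.mem_map.mpr ⟨c, PySem.List.mem_pyRange_one.mpr ⟨by omega, by omega⟩, rfl⟩

theorem pvUnseen_add_lt (board : List (List (Option Int))) {r c : Int}
    (hin : (r, c) ∈ pvGrid board) {v : List (Int × Int)} (hnv : (r, c) ∉ v) :
    pvUnseen board (PySem.Set.add v (r, c)) < pvUnseen board v := by
  unfold pvUnseen
  rw [PySem.Set.add_of_not_mem hnv]
  have hfun : (fun p : Int × Int => decide (p ∉ v ++ [(r, c)])) =
      fun p => decide (p ∉ v ++ [(r, c)]) && decide (p ∉ v) := by
    funext p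
    by_cases hp : p ∈ v <;> simp [hp]
  rw [hfun, ← List.filter_filter]
  apply List.length_filter_lt_length_iff_exists.mpr
  exact ⟨(r, c), by simp [List.mem_filter, hin, hnv], by simp⟩

-- port of A's dfs: the same three guards in the same order, then the four neighbour
-- calls of GraphADT.neighbors in order; the returned pair carries the "visited only
-- grows" fact needed by the termination argument
def pvDfs (board : List (List (Option Int))) (color : Option Int) (r c : Int)
    (visited component : List (Int × Int)) :
    {vc : List (Int × Int) × List (Int × Int) // ∀ x ∈ visited, x ∈ vc.1} :=
  if h1 : r < 0 ∨ (board.length : Int) ≤ r ∨ c < 0 ∨ ((board.headD []).length : Int) ≤ c then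
    ⟨(visited, component), fun _ hx => hx⟩
  else if h2 : (r, c) ∈ visited then
    ⟨(visited, component), fun _ hx => hx⟩
  else if h3 : pvCell board r c ≠ color then
    ⟨(visited, component), fun _ hx => hx⟩
  else
    let s1 := pvDfs board color (r + 1) c (PySem.Set.add visited (r, c)) (component ++ [(r, c)])
    let s2 := pvDfs board color (r - 1) c s1.1.1 s1.1.2
    let s3 := pvDfs board color r (c + 1) s2.1.1 s2.1.2
    let s4 := pvDfs board color r (c - 1) s3.1.1 s3.1.2
    ⟨s4.1, fun x hx => s4.2 x (s3.2 x (s2.2 x (s1.2 x (pvMem_set_add hx))))⟩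
termination_by pvUnseen board visited
decreasing_by
  · exact pvUnseen_add_lt board (pvMem_grid h1) h2
  · exact lt_of_le_of_lt (pvUnseen_mono board s1.2)
      (pvUnseen_add_lt board (pvMem_grid h1) h2)
  · exact lt_of_le_of_lt
      (le_trans (pvUnseen_mono board s2.2) (pvUnseen_mono board s1.2))
      (pvUnseen_add_lt board (pvMem_grid h1) h2)
  · exact lt_of_le_of_lt
      (le_trans (pvUnseen_mono board s3.2)
        (le_trans (pvUnseen_mono board s2.2) (pvUnseen_mono board s1.2)))
      (pvUnseen_add_lt board (pvMem_grid h1) h2)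

def pvGetComponent (board : List (List (Option Int))) (r c : Int) : List (Int × Int) :=
  match pvCell board r c with
  | none => []
  | some v => (pvDfs board (some v) r c [] []).1.2

def get_all_components (board : List (List (Option Int))) : List (List (Int × Int)) :=
  ((PySem.List.pyRange 0 (board.length : Int) 1).foldl (fun st r =>
    (PySem.List.pyRange 0 ((board.headD []).length : Int) 1).foldl (fun st c =>
      if pvTruthy (pvCell board r c) ∧ (r, c) ∉ st.2 then
        let comp := pvGetComponent board r c
        (if 1 < comp.length then st.1 ++ [comp] else st.1,
         comp.foldl (fun v cell => PySem.Set.add v cell) st.2)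
      else st) st)
    (([] : List (List (Int × Int))), ([] : List (Int × Int)))).1

-- ===== PORT B =====

-- B's while-loop: pop the top of the stack (head = top), validate it, push the four
-- neighbours reversed (so they pop in A's neighbour order)
def pvFlood (board : List (List (Option Int))) (color : Option Int)
    (stack seen comp : List (Int × Int)) : List (Int × Int) × List (Int × Int) :=
  match stack with
  | [] => (seen, comp)
  | (r, c) :: rest =>
    if h1 : r < 0 ∨ (board.length : Int) ≤ r ∨ c < 0 ∨ ((board.headD []).length : Int) ≤ c then
      pvFlood board color rest seen comp
    else if h2 : (r, c) ∈ seen then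
      pvFlood board color rest seen comp
    else if h3 : pvCell board r c ≠ color then
      pvFlood board color rest seen comp
    else
      pvFlood board color ((r + 1, c) :: (r - 1, c) :: (r, c + 1) :: (r, c - 1) :: rest)
        (PySem.Set.add seen (r, c)) (comp ++ [(r, c)])
termination_by 4 * pvUnseen board seen + stack.length
decreasing_by
  · simp only [List.length_cons]; omega
  · simp only [List.length_cons]; omega
  · simp only [List.length_cons]; omega
  · have := pvUnseen_add_lt board (pvMem_grid h1) h2
    simp only [List.length_cons]; omega

def get_all_components_alt (board : List (List (Option Int))) : List (List (Int × Int)) :=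
  ((PySem.List.pyRange 0 (board.length : Int) 1).foldl (fun st r =>
    (PySem.List.pyRange 0 ((board.headD []).length : Int) 1).foldl (fun st c =>
      if pvTruthy (pvCell board r c) ∧ (r, c) ∉ st.2 then
        let comp := (pvFlood board (pvCell board r c) [(r, c)] [] []).2
        (if 1 < comp.length then st.1 ++ [comp] else st.1,
         comp.foldl (fun v cell => PySem.Set.add v cell) st.2)
      else st) st)
    (([] : List (List (Int × Int))), ([] : List (Int × Int)))).1

-- ===== PRECONDITION & SPEC =====
-- Pre_ excludes exactly the boards on which the Python A raises an IndexError: the empty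
-- board (len(board[0])) and ragged boards with some row shorter than the first row
-- (board[r][c] in the outer scan).
def Pre_get_all_components (board : List (List (Option Int))) : Prop :=
  board ≠ [] ∧ ∀ row ∈ board, (board.headD []).length ≤ row.length
instance (board : List (List (Option Int))) : Decidable (Pre_get_all_components board) := by
  unfold Pre_get_all_components; infer_instance

def pvWitness_get_all_components : List (List (Option Int)) :=
  [[some 1, some 1], [none, some 2]]

def Spec_get_all_components (board : List (List (Option Int))) (out : List (List (Int × Int))) : Prop := out = get_all_components_alt board
instance (board : List (List (Option Int))) (out : List (List (Int × Int))) : Decidable (Spec_get_all_components board out) := by unfold Spec_get_all_components; infer_instance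

-- ===== CLAIM (what is proved, stated in full; the proofs are below) =====
def Claim_equal_get_all_components : Prop := ∀ (board : List (List (Option Int))), Dom_get_all_components board → Pre_get_all_components board → Spec_get_all_components board (get_all_components board)

-- ===== LEMMAS AND PROOFS =====

-- factoring: running the stack machine with (r, c) on top is running A's dfs at (r, c)
-- and then the stack machine on the rest of the stack from the resulting state
set_option maxHeartbeats 1600000 in
theorem pvFlood_factor (board : List (List (Option Int))) (color : Option Int) :
    ∀ (n : Nat) (visited : List (Int × Int)), pvUnseen board visited ≤ n →
    ∀ (r c : Int) (rest component : List (Int × Int)),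
    pvFlood board color ((r, c) :: rest) visited component =
      pvFlood board color rest (pvDfs board color r c visited component).1.1
        (pvDfs board color r c visited component).1.2 := by
  intro n
  induction n with
  | zero =>
    intro visited hv r c rest component
    rw [pvFlood, pvDfs]
    split_ifs with h1 h2 h3
    · rfl
    · rfl
    · rfl
    · exact absurd (pvUnseen_add_lt board (pvMem_grid h1) h2) (by omega)
  | succ n ih =>
    intro visited hv r c rest component
    rw [pvFlood, pvDfs]
    split_ifs with h1 h2 h3
    · rfl
    · rfl
    · rfl
    · have hlt := pvUnseen_add_lt board (pvMem_grid h1) h2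
      have hv0 : pvUnseen board (PySem.Set.add visited (r, c)) ≤ n := by omega
      rw [ih _ hv0]
      have hle1 : pvUnseen board
          (pvDfs board color (r + 1) c (PySem.Set.add visited (r, c))
            (component ++ [(r, c)])).1.1 ≤ n :=
        le_trans (pvUnseen_mono board
          (pvDfs board color (r + 1) c (PySem.Set.add visited (r, c))
            (component ++ [(r, c)])).2) hv0
      rw [ih _ hle1]
      have hle2 : pvUnseen board
          (pvDfs board color (r - 1) c
            (pvDfs board color (r + 1) c (PySem.Set.add visited (r, c))
              (component ++ [(r, c)])).1.1
            (pvDfs board color (r + 1) c (PySem.Set.add visited (r, c))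
              (component ++ [(r, c)])).1.2).1.1 ≤ n :=
        le_trans (pvUnseen_mono board
          (pvDfs board color (r - 1) c
            (pvDfs board color (r + 1) c (PySem.Set.add visited (r, c))
              (component ++ [(r, c)])).1.1
            (pvDfs board color (r + 1) c (PySem.Set.add visited (r, c))
              (component ++ [(r, c)])).1.2).2) hle1
      rw [ih _ hle2]
      have hle3 : pvUnseen board
          (pvDfs board color r (c + 1)
            (pvDfs board color (r - 1) c
              (pvDfs board color (r + 1) c (PySem.Set.add visited (r, c))
                (component ++ [(r, c)])).1.1
              (pvDfs board color (r + 1) c (PySem.Set.add visited (r, c))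
                (component ++ [(r, c)])).1.2).1.1
            (pvDfs board color (r - 1) c
              (pvDfs board color (r + 1) c (PySem.Set.add visited (r, c))
                (component ++ [(r, c)])).1.1
              (pvDfs board color (r + 1) c (PySem.Set.add visited (r, c))
                (component ++ [(r, c)])).1.2).1.2).1.1 ≤ n :=
        le_trans (pvUnseen_mono board
          (pvDfs board color r (c + 1)
            (pvDfs board color (r - 1) c
              (pvDfs board color (r + 1) c (PySem.Set.add visited (r, c))
                (component ++ [(r, c)])).1.1
              (pvDfs board color (r + 1) c (PySem.Set.add visited (r, c))
                (component ++ [(r, c)])).1.2).1.1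
            (pvDfs board color (r - 1) c
              (pvDfs board color (r + 1) c (PySem.Set.add visited (r, c))
                (component ++ [(r, c)])).1.1
              (pvDfs board color (r + 1) c (PySem.Set.add visited (r, c))
                (component ++ [(r, c)])).1.2).1.2).2) hle2
      rw [ih _ hle3]

theorem pvFlood_nil (board : List (List (Option Int))) (color : Option Int)
    (seen comp : List (Int × Int)) : pvFlood board color [] seen comp = (seen, comp) := by
  rw [pvFlood]

theorem pvFlood_eq_dfs (board : List (List (Option Int))) (color : Option Int) (r c : Int) :
    pvFlood board color [(r, c)] [] [] = (pvDfs board color r c [] []).1 := by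
  rw [pvFlood_factor board color (pvUnseen board []) [] le_rfl r c [] [], pvFlood_nil]

theorem pvComp_eq (board : List (List (Option Int))) (r c : Int)
    (ht : pvTruthy (pvCell board r c) = true) :
    (pvFlood board (pvCell board r c) [(r, c)] [] []).2 = pvGetComponent board r c := by
  unfold pvGetComponent
  match hcell : pvCell board r c with
  | none => rw [hcell] at ht; simp [pvTruthy] at ht
  | some v => rw [pvFlood_eq_dfs]

-- ===== VERDICT (by name: the statement is the Claim_ definition above) =====
theorem get_all_components_spec : Claim_equal_get_all_components := by
  intro board _ _
  unfold Spec_get_all_components get_all_components get_all_components_alt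
  have hfun : (fun (st : List (List (Int × Int)) × List (Int × Int)) (r : Int) =>
      (PySem.List.pyRange 0 ((board.headD []).length : Int) 1).foldl (fun st c =>
        if pvTruthy (pvCell board r c) ∧ (r, c) ∉ st.2 then
          let comp := pvGetComponent board r c
          (if 1 < comp.length then st.1 ++ [comp] else st.1,
           comp.foldl (fun v cell => PySem.Set.add v cell) st.2)
        else st) st) =
      (fun (st : List (List (Int × Int)) × List (Int × Int)) (r : Int) =>
      (PySem.List.pyRange 0 ((board.headD []).length : Int) 1).foldl (fun st c =>
        if pvTruthy (pvCell board r c) ∧ (r, c) ∉ st.2 then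
          let comp := (pvFlood board (pvCell board r c) [(r, c)] [] []).2
          (if 1 < comp.length then st.1 ++ [comp] else st.1,
           comp.foldl (fun v cell => PySem.Set.add v cell) st.2)
        else st) st) := by
    funext st r
    have hin : (fun (st : List (List (Int × Int)) × List (Int × Int)) (c : Int) =>
        if pvTruthy (pvCell board r c) ∧ (r, c) ∉ st.2 then
          let comp := pvGetComponent board r c
          (if 1 < comp.length then st.1 ++ [comp] else st.1,
           comp.foldl (fun v cell => PySem.Set.add v cell) st.2)
        else st) =
        (fun (st : List (List (Int × Int)) × List (Int × Int)) (c : Int) =>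
        if pvTruthy (pvCell board r c) ∧ (r, c) ∉ st.2 then
          let comp := (pvFlood board (pvCell board r c) [(r, c)] [] []).2
          (if 1 < comp.length then st.1 ++ [comp] else st.1,
           comp.foldl (fun v cell => PySem.Set.add v cell) st.2)
        else st) := by
      funext st c
      by_cases hg : pvTruthy (pvCell board r c) ∧ (r, c) ∉ st.2
      · rw [if_pos hg, if_pos hg, pvComp_eq board r c hg.1]
      · rw [if_neg hg, if_neg hg]
    rw [hin]
  exact congrArg (fun f =>
    ((PySem.List.pyRange 0 (board.length : Int) 1).foldl f
      (([] : List (List (Int × Int))), ([] : List (Int × Int)))).1) hfun
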